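-- pv_equiv track=rewrite | github.com/andryraveloarison/Spam_detection_message | ia/src/utils/function.py | compressWord
-- ===== SOURCE A (Python) =====
-- def compressWord(text):
--     result = ""
--     long = len(text)
--     if long > 2:
--         for i in range(len(text) - 2):
--             if not (text[i] == text[i+1] and text[i] == text[i+2]):  # Vérifie si le caractère actuel est le même que le suivant
--                 result += text[i]
--         return result+str(text[long-2])+str(text[long-1])
--
--     else :
--         return text
-- ===== SOURCE B (Python) =====
-- def compressWord(text):
--     if len(text) <= 2:
--         return text
--     kept = []
--     prev = None
--     count = 0
--     for ch in text:
--         count = count + 1 if ch == prev else 1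
--         prev = ch
--         if count <= 2:
--             kept.append(ch)
--     return ''.join(kept)
-- ===== Notes on version B (the rewrite author's own statement) =====
-- stated objective: simpler
-- what changed: Replaces A's index-window scan (look ahead two positions, then re-append the last two characters) by a single run-length pass that keeps each character while its consecutive-repeat count is at most 2, joining a list instead of repeated string concatenation.
import Mathlib
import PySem

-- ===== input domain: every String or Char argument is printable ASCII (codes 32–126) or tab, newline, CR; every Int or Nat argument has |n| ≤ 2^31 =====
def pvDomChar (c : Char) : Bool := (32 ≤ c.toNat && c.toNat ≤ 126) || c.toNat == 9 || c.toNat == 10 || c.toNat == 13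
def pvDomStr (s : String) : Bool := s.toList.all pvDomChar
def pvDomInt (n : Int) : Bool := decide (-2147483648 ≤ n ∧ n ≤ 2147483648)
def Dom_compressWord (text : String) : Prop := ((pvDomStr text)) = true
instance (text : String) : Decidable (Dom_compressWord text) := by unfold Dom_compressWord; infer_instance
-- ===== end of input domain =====

-- B replaces A's look-ahead index window (plus unconditional re-append of the last two
-- characters) by a single run-length pass keeping each character while its consecutive
-- repeat count is ≤ 2; objective: simpler (no indexing, no special tail handling).

-- ===== PORT A =====
def compressWord (text : String) : String :=
  let cs := text.toList
  let long : Int := cs.length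
  if long > 2 then
    let result : List Char :=
      (PySem.List.pyRange 0 (long - 2) 1).foldl
        (fun r i =>
          if ¬ (PySem.List.pyGetD cs i ' ' = PySem.List.pyGetD cs (i + 1) ' ' ∧
                PySem.List.pyGetD cs i ' ' = PySem.List.pyGetD cs (i + 2) ' ')
          then r ++ [PySem.List.pyGetD cs i ' ']
          else r) []
    String.mk (result ++ [PySem.List.pyGetD cs (long - 2) ' ', PySem.List.pyGetD cs (long - 1) ' '])
  else text

-- ===== PORT B =====
def compressWord_alt (text : String) : String :=
  let cs := text.toList
  if cs.length ≤ 2 then text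
  else
    let st :=
      cs.foldl
        (fun (s : List Char × Option Char × Int) ch =>
          let count : Int := if some ch = s.2.1 then s.2.2 + 1 else 1
          ((if count ≤ 2 then s.1 ++ [ch] else s.1), some ch, count))
        ([], none, 0)
    String.mk st.1

-- ===== PRECONDITION & SPEC =====
def Spec_compressWord (text : String) (out : String) : Prop := out = compressWord_alt text
instance (text : String) (out : String) : Decidable (Spec_compressWord text out) := by unfold Spec_compressWord; infer_instance

-- ===== CLAIM (what is proved, stated in full; the proofs are below) =====
def Claim_equal_compressWord : Prop := ∀ (text : String), Dom_compressWord text → Spec_compressWord text (compressWord text)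

-- ===== LEMMAS AND PROOFS =====

/-- Structural form of A's long branch: drop position `i` iff it starts an equal triple;
    the final two characters are always kept. -/
def aRec : List Char → List Char
  | a :: b :: c :: t => (if a = b ∧ a = c then [] else [a]) ++ aRec (b :: c :: t)
  | xs => xs

/-- Structural form of B's loop: state = previous char and repeat count. -/
def bRun : Option Char → Int → List Char → List Char
  | _, _, [] => []
  | prev, cnt, ch :: t =>
    let c' : Int := if some ch = prev then cnt + 1 else 1
    (if c' ≤ 2 then [ch] else []) ++ bRun (some ch) c' t

theorem bRun_cons (prev : Option Char) (cnt : Int) (ch : Char) (t : List Char) :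
    bRun prev cnt (ch :: t) =
      (if (if some ch = prev then cnt + 1 else 1) ≤ 2 then [ch] else []) ++
        bRun (some ch) (if some ch = prev then cnt + 1 else 1) t := rfl

/-- Nat-indexed filter/map form of A's loop. -/
def keepA (cs : List Char) : List Char :=
  ((List.range (cs.length - 2)).filter
    (fun k => decide ¬(cs.getD k ' ' = cs.getD (k + 1) ' ' ∧ cs.getD k ' ' = cs.getD (k + 2) ' '))).map
    (fun k => cs.getD k ' ')

theorem foldl_ite_app {α : Type} (P : α → Prop) [DecidablePred P] (f : α → Char) :
    ∀ (l : List α) (acc : List Char),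
      l.foldl (fun r x => if P x then r ++ [f x] else r) acc
        = acc ++ (l.filter (fun x => decide (P x))).map f := by
  intro l
  induction l with
  | nil => intro acc; simp
  | cons x t ih =>
    intro acc
    by_cases h : P x <;> simp [List.foldl_cons, h, ih]

theorem keepA_cons (a b c : Char) (t : List Char) :
    keepA (a :: b :: c :: t) = (if a = b ∧ a = c then [] else [a]) ++ keepA (b :: c :: t) := by
  unfold keepA
  rw [show (a :: b :: c :: t).length - 2 = ((b :: c :: t).length - 2) + 1 by simp]
  rw [List.range_succ_eq_map, List.filter_cons, List.filter_map]
  simp only [List.getD_cons_zero, List.getD_cons_succ, Function.comp_def]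
  by_cases h : a = b ∧ a = c
  · rcases h with ⟨rfl, rfl⟩
    simp [List.map_map, Function.comp_def]
  · simp [h, List.map_map, Function.comp_def]

theorem keepA_spec : ∀ cs : List Char, 2 ≤ cs.length →
    keepA cs ++ [cs.getD (cs.length - 2) ' ', cs.getD (cs.length - 1) ' '] = aRec cs := by
  intro cs
  induction cs with
  | nil => intro h; simp at h
  | cons a t ih =>
    intro h
    match t with
    | [] => simp at h
    | [b] => simp [keepA, aRec]
    | b :: c :: t' =>
      have h2 : 2 ≤ (b :: c :: t').length := by simp
      have hlast2 : (a :: b :: c :: t').getD ((a :: b :: c :: t').length - 2) ' '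
          = (b :: c :: t').getD ((b :: c :: t').length - 2) ' ' := by
        have : (a :: b :: c :: t').length - 2 = ((b :: c :: t').length - 2) + 1 := by simp
        rw [this, List.getD_cons_succ]
      have hlast1 : (a :: b :: c :: t').getD ((a :: b :: c :: t').length - 1) ' '
          = (b :: c :: t').getD ((b :: c :: t').length - 1) ' ' := by
        have : (a :: b :: c :: t').length - 1 = ((b :: c :: t').length - 1) + 1 := by simp
        rw [this, List.getD_cons_succ]
      rw [keepA_cons, hlast2, hlast1, List.append_assoc, ih h2]
      show _ = aRec (a :: b :: c :: t')
      simp [aRec]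

theorem bRun_spec : ∀ (cs : List Char) (acc : List Char) (prev : Option Char) (cnt : Int),
    (cs.foldl
      (fun (s : List Char × Option Char × Int) ch =>
        let count : Int := if some ch = s.2.1 then s.2.2 + 1 else 1
        ((if count ≤ 2 then s.1 ++ [ch] else s.1), some ch, count))
      (acc, prev, cnt)).1 = acc ++ bRun prev cnt cs := by
  intro cs
  induction cs with
  | nil => intro acc prev cnt; simp [bRun]
  | cons ch t ih =>
    intro acc prev cnt
    rw [List.foldl_cons, bRun_cons]
    show (t.foldl _ ((if (if some ch = prev then cnt + 1 else 1) ≤ 2 then acc ++ [ch] else acc),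
      some ch, (if some ch = prev then cnt + 1 else 1))).1 = _
    rw [ih]
    by_cases hc : (if some ch = prev then cnt + 1 else 1) ≤ 2 <;> simp [hc]

-- run decomposition lemmas

theorem aRec_cons_ne (a : Char) (rest : List Char) (h : rest.head? ≠ some a) :
    aRec (a :: rest) = a :: aRec rest := by
  match rest with
  | [] => simp [aRec]
  | [b] => simp [aRec]
  | b :: c :: t =>
    have hab : ¬(a = b) := by simp at h; intro he; exact h he.symm
    show aRec (a :: b :: c :: t) = a :: aRec (b :: c :: t)
    rw [show aRec (a :: b :: c :: t) = (if a = b ∧ a = c then [] else [a]) ++ aRec (b :: c :: t) from rfl]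
    simp [hab]

theorem aRec_run : ∀ (k : Nat) (a : Char) (rest : List Char), rest.head? ≠ some a →
    aRec (List.replicate (k + 1) a ++ rest) = List.replicate (min (k + 1) 2) a ++ aRec rest := by
  intro k
  induction k with
  | zero =>
    intro a rest h
    simpa using aRec_cons_ne a rest h
  | succ k ih =>
    intro a rest h
    cases k with
    | zero =>
      match rest with
      | [] => simp [aRec]
      | b :: t =>
        have hab : ¬(a = b) := by simp at h; intro he; exact h he.symm
        show aRec (a :: a :: b :: t) = a :: a :: aRec (b :: t)
        rw [show aRec (a :: a :: b :: t) = (if a = a ∧ a = b then [] else [a]) ++ aRec (a :: b :: t) from rfl]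
        rw [aRec_cons_ne a (b :: t) h]
        simp [hab]
    | succ j =>
      have key : aRec (List.replicate (j + 3) a ++ rest) = aRec (List.replicate (j + 2) a ++ rest) := by
        rw [show List.replicate (j + 3) a = a :: a :: a :: List.replicate j a by simp [List.replicate_succ]]
        rw [show List.replicate (j + 2) a = a :: a :: List.replicate j a by simp [List.replicate_succ]]
        show aRec (a :: a :: a :: (List.replicate j a ++ rest)) = _
        rw [show aRec (a :: a :: a :: (List.replicate j a ++ rest))
            = (if a = a ∧ a = a then [] else [a]) ++ aRec (a :: a :: (List.replicate j a ++ rest)) from rfl]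
        simp
      rw [show j + 1 + 1 + 1 = j + 3 by omega] at *
      rw [key, ih a rest h]
      have : min (j + 1 + 1) 2 = min (j + 3) 2 := by omega
      rw [this]

theorem bRun_state_reset (rest : List Char) (p : Char) (c : Int) (h : rest.head? ≠ some p) :
    bRun (some p) c rest = bRun none 0 rest := by
  match rest with
  | [] => rfl
  | b :: t =>
    have hbp : ¬(some b = some p) := by simpa using h
    rw [bRun_cons, bRun_cons]
    simp [hbp]

theorem bRun_skip : ∀ (m : Nat) (a : Char) (rest : List Char) (c : Int), 2 ≤ c →
    bRun (some a) c (List.replicate m a ++ rest) = bRun (some a) (c + m) rest := by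
  intro m
  induction m with
  | zero => intro a rest c _; simp
  | succ m ih =>
    intro a rest c hc
    rw [show List.replicate (m + 1) a ++ rest = a :: (List.replicate m a ++ rest) from rfl]
    rw [bRun_cons]
    rw [if_pos rfl, if_neg (by omega)]
    rw [List.nil_append, ih a rest (c + 1) (by omega)]
    congr 1
    push_cast
    ring

theorem bRun_run : ∀ (k : Nat) (a : Char) (rest : List Char), rest.head? ≠ some a →
    bRun none 0 (List.replicate (k + 1) a ++ rest) = List.replicate (min (k + 1) 2) a ++ bRun none 0 rest := by
  intro k a rest h
  cases k with
  | zero =>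
    rw [show List.replicate 1 a ++ rest = a :: rest from rfl, bRun_cons]
    rw [show (if some a = (none : Option Char) then (0 : Int) + 1 else 1) = 1 by simp]
    rw [if_pos (by norm_num : (1 : Int) ≤ 2)]
    rw [bRun_state_reset rest a 1 h]
    rfl
  | succ j =>
    rw [show List.replicate (j + 1 + 1) a ++ rest = a :: a :: (List.replicate j a ++ rest) by
      simp [List.replicate_succ]]
    rw [bRun_cons]
    rw [show (if some a = (none : Option Char) then (0 : Int) + 1 else 1) = 1 by simp]
    rw [if_pos (by norm_num : (1 : Int) ≤ 2), bRun_cons]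
    rw [show (if some a = some a then (1 : Int) + 1 else 1) = 2 by simp]
    rw [if_pos (by norm_num : (2 : Int) ≤ 2)]
    rw [bRun_skip j a rest 2 (by norm_num), bRun_state_reset rest a _ h]
    simp [List.replicate_succ]

theorem head?_dropWhile_ne (a : Char) : ∀ t : List Char,
    (t.dropWhile (fun x => x == a)).head? ≠ some a := by
  intro t
  induction t with
  | nil => simp
  | cons x xs ih =>
    by_cases hx : x = a
    · simpa [List.dropWhile_cons, hx] using ih
    · simp [hx]

theorem aRec_eq_bRun (cs : List Char) : aRec cs = bRun none 0 cs := by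
  suffices H : ∀ n (cs : List Char), cs.length ≤ n → aRec cs = bRun none 0 cs from
    H cs.length cs le_rfl
  intro n
  induction n with
  | zero =>
    intro cs h
    have : cs = [] := by cases cs <;> simp_all
    simp [this, aRec, bRun]
  | succ n ih =>
    intro cs h
    match cs with
    | [] => simp [aRec, bRun]
    | a :: t =>
      have hsplit : t = t.takeWhile (fun x => x == a) ++ t.dropWhile (fun x => x == a) :=
        (List.takeWhile_append_dropWhile).symm
      set k := (t.takeWhile (fun x => x == a)).length with hk
      set rest := t.dropWhile (fun x => x == a) with hrest
      have hrepl : t.takeWhile (fun x => x == a) = List.replicate k a := by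
        rw [List.eq_replicate_iff]
        exact ⟨rfl, fun b hb => by simpa using List.mem_takeWhile_imp hb⟩
      have hhead : rest.head? ≠ some a := head?_dropWhile_ne a t
      have hform : a :: t = List.replicate (k + 1) a ++ rest := by
        conv_lhs => rw [hsplit]
        rw [hrepl]
        simp [List.replicate_succ]
      have hlen : rest.length ≤ n := by
        have h1 : rest.length ≤ t.length := List.length_dropWhile_le _ _
        have h2 : t.length ≤ n := by simpa using Nat.lt_succ_iff.mp (by simpa using h)
        omega
      rw [hform, aRec_run k a rest hhead, bRun_run k a rest hhead, ih rest hlen]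

theorem compressWord_long (text : String) (h : 2 < text.toList.length) :
    compressWord text = String.mk (aRec text.toList) := by
  unfold compressWord
  set cs := text.toList with hcs
  have hlong : ((cs.length : Int) > 2) := by exact_mod_cast h
  rw [if_pos hlong]
  have hfold :
      (PySem.List.pyRange 0 ((cs.length : Int) - 2) 1).foldl
        (fun r i =>
          if ¬ (PySem.List.pyGetD cs i ' ' = PySem.List.pyGetD cs (i + 1) ' ' ∧
                PySem.List.pyGetD cs i ' ' = PySem.List.pyGetD cs (i + 2) ' ')
          then r ++ [PySem.List.pyGetD cs i ' ']
          else r) [] = keepA cs := by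
    rw [PySem.List.pyRange_one]
    have htn : (((cs.length : Int) - 2) - 0).toNat = cs.length - 2 := by omega
    rw [htn, List.foldl_map]
    have hbody : (fun (r : List Char) (k : Nat) =>
        if ¬ (PySem.List.pyGetD cs ((0 : Int) + k) ' ' = PySem.List.pyGetD cs ((0 : Int) + k + 1) ' ' ∧
              PySem.List.pyGetD cs ((0 : Int) + k) ' ' = PySem.List.pyGetD cs ((0 : Int) + k + 2) ' ')
        then r ++ [PySem.List.pyGetD cs ((0 : Int) + k) ' ']
        else r)
        = (fun (r : List Char) (k : Nat) =>
            if ¬ (cs.getD k ' ' = cs.getD (k + 1) ' ' ∧ cs.getD k ' ' = cs.getD (k + 2) ' ')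
            then r ++ [cs.getD k ' '] else r) := by
      funext r k
      rw [show (0 : Int) + (k : Int) = ((k : Nat) : Int) by ring]
      rw [show ((k : Nat) : Int) + 1 = (((k + 1 : Nat)) : Int) by push_cast; ring]
      rw [show ((k : Nat) : Int) + 2 = (((k + 2 : Nat)) : Int) by push_cast; ring]
      rw [PySem.List.pyGetD_natCast, PySem.List.pyGetD_natCast, PySem.List.pyGetD_natCast]
    rw [hbody,
      foldl_ite_app (fun k => ¬ (cs.getD k ' ' = cs.getD (k + 1) ' ' ∧ cs.getD k ' ' = cs.getD (k + 2) ' '))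
        (fun k => cs.getD k ' ') (List.range (cs.length - 2)) []]
    simp [keepA]
  rw [hfold]
  have hg2 : PySem.List.pyGetD cs ((cs.length : Int) - 2) ' ' = cs.getD (cs.length - 2) ' ' := by
    have e : ((cs.length : Int) - 2) = (((cs.length - 2 : Nat)) : Int) := by omega
    rw [e, PySem.List.pyGetD_natCast]
  have hg1 : PySem.List.pyGetD cs ((cs.length : Int) - 1) ' ' = cs.getD (cs.length - 1) ' ' := by
    have e : ((cs.length : Int) - 1) = (((cs.length - 1 : Nat)) : Int) := by omega
    rw [e, PySem.List.pyGetD_natCast]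
  rw [hg2, hg1]
  show String.mk (keepA cs ++ [cs.getD (cs.length - 2) ' ', cs.getD (cs.length - 1) ' ']) = _
  rw [keepA_spec cs (by omega)]

theorem compressWord_alt_long (text : String) (h : 2 < text.toList.length) :
    compressWord_alt text = String.mk (bRun none 0 text.toList) := by
  unfold compressWord_alt
  rw [if_neg (by omega)]
  show String.mk ((text.toList.foldl
      (fun (s : List Char × Option Char × Int) ch =>
        let count : Int := if some ch = s.2.1 then s.2.2 + 1 else 1
        ((if count ≤ 2 then s.1 ++ [ch] else s.1), some ch, count)) ([], none, 0)).1) = _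
  rw [bRun_spec text.toList [] none 0]
  rfl

-- ===== VERDICT (by name: the statement is the Claim_ definition above) =====
theorem compressWord_spec : Claim_equal_compressWord := by
  intro text _
  unfold Spec_compressWord
  by_cases h : 2 < text.toList.length
  · rw [compressWord_long text h, compressWord_alt_long text h, aRec_eq_bRun]
  · unfold compressWord compressWord_alt
    rw [if_neg (by exact_mod_cast (by omega : ¬((text.toList.length : Int) > 2))),
      if_pos (by omega)]
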